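-- pv_equiv track=rewrite | github.com/krishnakumarsabbu-prog/MQ-IntelliMesh | backend/app/utils/naming_utils.py | classify_dataset
-- ===== SOURCE A (Python) =====
-- _QM_COLUMN_HINTS = {"qm", "qm_name", "queue_manager", "queue_manager_name", "qmgr", "manager_name"}
--
-- _QUEUE_COLUMN_HINTS = {"queue_name", "queue", "owning_qm", "queue_type", "maxdepth", "defpsist"}
--
-- _APP_COLUMN_HINTS = {"app_id", "app", "application", "application_id", "app_name", "connected_qm"}
--
-- _CHANNEL_COLUMN_HINTS = {"channel_name", "channel", "from_qm", "to_qm", "channel_type", "source_qm", "target_qm"}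
--
-- _RELATIONSHIP_COLUMN_HINTS = {"producer_app", "consumer_app", "producer", "consumer", "source_app", "target_app"}
--
-- _METADATA_COLUMN_HINTS = {"region", "neighborhood", "environment"}
--
-- _FILENAME_HINTS: dict[str, list[str]] = {
--     "queue_managers": ["queue_manager", "queuemanager", "qm", "qmgr", "managers"],
--     "queues": ["queue", "queues"],
--     "applications": ["application", "applications", "app", "apps"],
--     "channels": ["channel", "channels"],
--     "relationships": ["relationship", "relationships", "relation", "producer", "consumer", "flow"],
--     "metadata": ["metadata", "meta", "environment", "region", "neighborhood"],
-- }
--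
-- def normalize_header(col: str) -> str:
--     return col.strip().lower().replace(" ", "_").replace("-", "_")
--
-- def classify_dataset(filename: str, columns: list[str]) -> str:
--     fname = filename.lower().replace("-", "_").replace(" ", "_")
--     fname_stem = fname.rsplit(".", 1)[0] if "." in fname else fname
--
--     for dataset_type, hints in _FILENAME_HINTS.items():
--         for hint in hints:
--             if hint in fname_stem:
--                 return dataset_type
--
--     norm_cols = {normalize_header(c) for c in columns}
--
--     scores: dict[str, int] = {}
--     for dtype, hint_set in [
--         ("queue_managers", _QM_COLUMN_HINTS),
--         ("queues", _QUEUE_COLUMN_HINTS),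
--         ("applications", _APP_COLUMN_HINTS),
--         ("channels", _CHANNEL_COLUMN_HINTS),
--         ("relationships", _RELATIONSHIP_COLUMN_HINTS),
--         ("metadata", _METADATA_COLUMN_HINTS),
--     ]:
--         scores[dtype] = len(norm_cols & hint_set)
--
--     best = max(scores, key=lambda k: scores[k])
--     if scores[best] == 0:
--         return "unknown"
--     return best
-- ===== SOURCE B (Python) =====
-- _FILENAME_HINTS = {
--     "queue_managers": ["queue_manager", "queuemanager", "qm", "qmgr", "managers"],
--     "queues": ["queue", "queues"],
--     "applications": ["application", "applications", "app", "apps"],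
--     "channels": ["channel", "channels"],
--     "relationships": ["relationship", "relationships", "relation", "producer", "consumer", "flow"],
--     "metadata": ["metadata", "meta", "environment", "region", "neighborhood"],
-- }
--
-- _TYPE_ORDER = ["queue_managers", "queues", "applications", "channels", "relationships", "metadata"]
--
-- # inverted index: normalized column name -> the dataset type it votes for
-- _COLUMN_TYPE = {}
-- for _t, _hints in [
--     ("queue_managers", ["qm", "qm_name", "queue_manager", "queue_manager_name", "qmgr", "manager_name"]),
--     ("queues", ["queue_name", "queue", "owning_qm", "queue_type", "maxdepth", "defpsist"]),
--     ("applications", ["app_id", "app", "application", "application_id", "app_name", "connected_qm"]),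
--     ("channels", ["channel_name", "channel", "from_qm", "to_qm", "channel_type", "source_qm", "target_qm"]),
--     ("relationships", ["producer_app", "consumer_app", "producer", "consumer", "source_app", "target_app"]),
--     ("metadata", ["region", "neighborhood", "environment"]),
-- ]:
--     for _h in _hints:
--         _COLUMN_TYPE[_h] = _t
--
--
-- def normalize_header(col: str) -> str:
--     return col.strip().lower().replace(" ", "_").replace("-", "_")
--
--
-- def classify_dataset(filename: str, columns: list[str]) -> str:
--     fname = filename.lower().replace("-", "_").replace(" ", "_")
--     fname_stem = fname.rsplit(".", 1)[0] if "." in fname else fname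
--
--     for dataset_type, hints in _FILENAME_HINTS.items():
--         for hint in hints:
--             if hint in fname_stem:
--                 return dataset_type
--
--     counts = dict.fromkeys(_TYPE_ORDER, 0)
--     seen = set()
--     for col in columns:
--         n = normalize_header(col)
--         if n in seen:
--             continue
--         seen.add(n)
--         t = _COLUMN_TYPE.get(n)
--         if t is not None:
--             counts[t] += 1
--
--     best, best_count = "unknown", 0
--     for t in _TYPE_ORDER:
--         if counts[t] > best_count:
--             best, best_count = t, counts[t]
--     return best
-- ===== Notes on version B (the rewrite author's own statement) =====
-- stated objective: idiomatic
-- what changed: The six per-type set-intersection scores and the insertion-order dict argmax are replaced by one inverted-index dict (hint column -> dataset type) built once, a single seen-set pass over the columns that increments a vote counter per looked-up type, and a running-max winner loop over the fixed type order (strict improvement, so ties and the all-zero case reproduce A's first-maximal/'unknown' behaviour).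
import Mathlib
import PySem

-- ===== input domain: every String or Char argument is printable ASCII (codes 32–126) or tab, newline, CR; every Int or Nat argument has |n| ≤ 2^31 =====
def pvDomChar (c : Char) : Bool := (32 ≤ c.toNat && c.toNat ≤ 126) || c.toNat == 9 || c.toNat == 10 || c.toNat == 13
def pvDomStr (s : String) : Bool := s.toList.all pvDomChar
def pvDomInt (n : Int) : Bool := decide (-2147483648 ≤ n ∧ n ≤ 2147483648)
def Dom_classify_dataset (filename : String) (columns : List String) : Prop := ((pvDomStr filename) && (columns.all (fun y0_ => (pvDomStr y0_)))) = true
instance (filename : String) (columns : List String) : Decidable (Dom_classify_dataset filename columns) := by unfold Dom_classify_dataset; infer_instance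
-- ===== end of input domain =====

-- B replaces A's six set-intersection scores by one inverted-index pass over the (deduplicated)
-- normalized columns plus a running-max winner loop (objective: idiomatic/alternative, same cost).

-- ===== SHARED MODULE CONTEXT (identical lines in Source A and Source B) =====

-- module constant _FILENAME_HINTS (same dict in both sources)
def fnameHints : List (String × List String) :=
  [("queue_managers", ["queue_manager", "queuemanager", "qm", "qmgr", "managers"]),
   ("queues", ["queue", "queues"]),
   ("applications", ["application", "applications", "app", "apps"]),
   ("channels", ["channel", "channels"]),
   ("relationships", ["relationship", "relationships", "relation", "producer", "consumer", "flow"]),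
   ("metadata", ["metadata", "meta", "environment", "region", "neighborhood"])]

-- module helper normalize_header (identical in both sources)
def normalizeHeader (col : String) : String :=
  PySem.Str.replace (PySem.Str.replace (PySem.Str.lower (PySem.Str.strip col)) " " "_") "-" "_"

-- hand port of fname.rsplit(".", 1)[0] (PySem has no rsplit): the part before the LAST '.';
-- exact whenever '.' occurs in the string (the only way it is called)
def beforeLastDot (cs : List Char) : List Char :=
  ((cs.reverse.dropWhile (fun c => c ≠ '.')).drop 1).reverse

-- fname = filename.lower().replace("-","_").replace(" ","_"); stem = fname.rsplit(".",1)[0] if "." in fname else fname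
def stemOf (filename : String) : List Char :=
  let fname := PySem.Chars.replace (PySem.Chars.replace (PySem.Chars.lower filename.toList) ['-'] ['_']) [' '] ['_']
  if PySem.Chars.isIn ['.'] fname then beforeLastDot fname else fname

-- the filename early-return double loop (textually identical in Source A and Source B):
-- first dataset_type one of whose hints is a substring of the stem
def fnameType? (stem : List Char) : Option String :=
  fnameHints.findSome? (fun p => if p.2.any (fun h => PySem.Chars.isIn h.toList stem) then some p.1 else none)

-- ===== PORT A =====

def qmHints : PySem.Set String := PySem.Set.ofList ["qm", "qm_name", "queue_manager", "queue_manager_name", "qmgr", "manager_name"]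
def queueHints : PySem.Set String := PySem.Set.ofList ["queue_name", "queue", "owning_qm", "queue_type", "maxdepth", "defpsist"]
def appHints : PySem.Set String := PySem.Set.ofList ["app_id", "app", "application", "application_id", "app_name", "connected_qm"]
def channelHints : PySem.Set String := PySem.Set.ofList ["channel_name", "channel", "from_qm", "to_qm", "channel_type", "source_qm", "target_qm"]
def relHints : PySem.Set String := PySem.Set.ofList ["producer_app", "consumer_app", "producer", "consumer", "source_app", "target_app"]
def metaHints : PySem.Set String := PySem.Set.ofList ["region", "neighborhood", "environment"]

def scorePairs : List (String × PySem.Set String) :=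
  [("queue_managers", qmHints), ("queues", queueHints), ("applications", appHints),
   ("channels", channelHints), ("relationships", relHints), ("metadata", metaHints)]

def classify_dataset (filename : String) (columns : List String) : String :=
  match fnameType? (stemOf filename) with
  | some t => t
  | none =>
    let normCols : PySem.Set String := PySem.Set.ofList (columns.map normalizeHeader)
    let scores : PySem.Dict String Int :=
      scorePairs.foldl (fun d p => d.insert p.1 (PySem.Set.len (PySem.Set.inter normCols p.2))) PySem.Dict.empty
    -- max(scores, key=lambda k: scores[k]); scores always has six keys, so max? is never none
    let best := (PySem.List.max? scores.keys (fun k => scores.getD k 0)).getD "unknown"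
    if scores.getD best 0 == 0 then "unknown" else best

-- ===== PORT B =====

def typeOrder : List String :=
  ["queue_managers", "queues", "applications", "channels", "relationships", "metadata"]

def columnTypePairs : List (String × List String) :=
  [("queue_managers", ["qm", "qm_name", "queue_manager", "queue_manager_name", "qmgr", "manager_name"]),
   ("queues", ["queue_name", "queue", "owning_qm", "queue_type", "maxdepth", "defpsist"]),
   ("applications", ["app_id", "app", "application", "application_id", "app_name", "connected_qm"]),
   ("channels", ["channel_name", "channel", "from_qm", "to_qm", "channel_type", "source_qm", "target_qm"]),
   ("relationships", ["producer_app", "consumer_app", "producer", "consumer", "source_app", "target_app"]),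
   ("metadata", ["region", "neighborhood", "environment"])]

-- the inverted index _COLUMN_TYPE built once from the six (type, hints) pairs
def columnType : PySem.Dict String String :=
  columnTypePairs.foldl (fun d p => p.2.foldl (fun d h => d.insert h p.1) d) PySem.Dict.empty

-- t = _COLUMN_TYPE.get(n); if t is not None: counts[t] += 1
def voteStep (d : PySem.Dict String Int) (n : String) : PySem.Dict String Int :=
  match columnType.get? n with
  | some t => d.modify t 0 (· + 1)
  | none => d

def classify_dataset_alt (filename : String) (columns : List String) : String :=
  match fnameType? (stemOf filename) with
  | some t => t
  | none =>
    let counts0 : PySem.Dict String Int := typeOrder.foldl (fun d t => d.insert t 0) PySem.Dict.empty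
    let st := columns.foldl (fun (st : PySem.Dict String Int × PySem.Set String) col =>
        let n := normalizeHeader col
        if PySem.Set.contains st.2 n then st
        else (voteStep st.1 n, PySem.Set.add st.2 n)) (counts0, PySem.Set.empty)
    let counts := st.1
    (typeOrder.foldl (fun (b : String × Int) t =>
        if counts.getD t 0 > b.2 then (t, counts.getD t 0) else b) ("unknown", 0)).1

-- ===== PRECONDITION & SPEC =====
def Spec_classify_dataset (filename : String) (columns : List String) (out : String) : Prop := out = classify_dataset_alt filename columns
instance (filename : String) (columns : List String) (out : String) : Decidable (Spec_classify_dataset filename columns out) := by unfold Spec_classify_dataset; infer_instance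

-- ===== CLAIM (what is proved, stated in full; the proofs are below) =====
def Claim_equal_classify_dataset : Prop := ∀ (filename : String) (columns : List String), Dom_classify_dataset filename columns → Spec_classify_dataset filename columns (classify_dataset filename columns)

-- ===== LEMMAS AND PROOFS =====

-- B's one pass with a `seen` set equals a plain vote-fold over the deduplicated normalized columns
lemma loop_split (xs : List String) (d : PySem.Dict String Int) (s : PySem.Set String) :
    xs.foldl (fun (st : PySem.Dict String Int × PySem.Set String) col =>
        let n := normalizeHeader col
        if PySem.Set.contains st.2 n then st
        else (voteStep st.1 n, PySem.Set.add st.2 n)) (d, s)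
    = (((PySem.Set.ofList (xs.map normalizeHeader)).filter (fun y => !PySem.Set.contains s y)).foldl voteStep d,
       PySem.Set.update s (xs.map normalizeHeader)) := by
  induction xs generalizing d s with
  | nil => simp [PySem.Set.update]
  | cons c xs ih =>
    simp only [List.foldl_cons, List.map_cons, PySem.Set.ofList_cons, PySem.Set.update_cons]
    set n := normalizeHeader c with hn
    set T := PySem.Set.ofList (xs.map normalizeHeader) with hT
    by_cases hc : PySem.Set.contains s n = true
    · have hmem : n ∈ s := by simpa using hc
      simp only [hc, if_true]
      rw [ih]
      have hfil : (T.discard n).filter (fun y => !PySem.Set.contains s y)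
          = T.filter (fun y => !PySem.Set.contains s y) := by
        simp only [PySem.Set.discard, List.filter_filter]
        apply List.filter_congr
        intro y _
        by_cases hy : y = n
        · subst hy; simp [hmem]
        · simp [hy]
      have hadd : PySem.Set.add s n = s := by rw [PySem.Set.add, if_pos hc]
      rw [List.filter_cons]
      simp only [hc, Bool.not_true, if_neg (by simp : ¬((false : Bool) = true))]
      rw [hfil, hadd]
    · have hcf : PySem.Set.contains s n = false := by simpa using hc
      simp only [hcf, Bool.false_eq_true, if_false]
      have hadd : PySem.Set.add s n = s ++ [n] := by rw [PySem.Set.add, if_neg hc]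
      rw [hadd, ih]
      have hfil : T.filter (fun y => !PySem.Set.contains (s ++ [n]) y)
          = (T.discard n).filter (fun y => !PySem.Set.contains s y) := by
        simp only [PySem.Set.discard, List.filter_filter]
        apply List.filter_congr
        intro y _
        by_cases hy : y = n
        · subst hy; simp [PySem.Set.contains]
        · simp [PySem.Set.contains, hy, List.mem_append]
      rw [hfil]
      rw [List.filter_cons]
      have hns : n ∉ s := by simpa using hcf
      simp [hns, List.foldl_cons]

-- vote counts of the plain fold = occurrence counts of the inverted-index lookup
set_option maxRecDepth 100000 in
lemma getD_foldl_voteStep (S : List String) (d : PySem.Dict String Int) (t : String) :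
    (S.foldl voteStep d).getD t 0 = d.getD t 0 + (S.countP (fun n => columnType.get? n == some t) : Int) := by
  induction S generalizing d with
  | nil => simp
  | cons n S ih =>
    rw [List.foldl_cons, ih, List.countP_cons]
    cases hq : columnType.get? n with
    | none => unfold voteStep; rw [hq]; simp
    | some u =>
      by_cases ht : t = u
      · subst ht
        unfold voteStep; rw [hq]
        simp [PySem.Dict.getD_modify_self]
        ring
      · unfold voteStep; rw [hq]
        simp only [PySem.Dict.getD_modify]
        rw [if_neg ht]
        simp
        exact fun h => ht h.symm

-- the inverted index written out (all 34 hint columns are distinct, so every insert appends)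
set_option maxRecDepth 100000 in
set_option maxHeartbeats 1000000 in
lemma hct : columnType = PySem.Dict.mk [("qm","queue_managers"),("qm_name","queue_managers"),("queue_manager","queue_managers"),("queue_manager_name","queue_managers"),("qmgr","queue_managers"),("manager_name","queue_managers"),("queue_name","queues"),("queue","queues"),("owning_qm","queues"),("queue_type","queues"),("maxdepth","queues"),("defpsist","queues"),("app_id","applications"),("app","applications"),("application","applications"),("application_id","applications"),("app_name","applications"),("connected_qm","applications"),("channel_name","channels"),("channel","channels"),("from_qm","channels"),("to_qm","channels"),("channel_type","channels"),("source_qm","channels"),("target_qm","channels"),("producer_app","relationships"),("consumer_app","relationships"),("producer","relationships"),("consumer","relationships"),("source_app","relationships"),("target_app","relationships"),("region","metadata"),("neighborhood","metadata"),("environment","metadata")] := by decide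

def allKeys : List String := ["qm","qm_name","queue_manager","queue_manager_name","qmgr","manager_name","queue_name","queue","owning_qm","queue_type","maxdepth","defpsist","app_id","app","application","application_id","app_name","connected_qm","channel_name","channel","from_qm","to_qm","channel_type","source_qm","target_qm","producer_app","consumer_app","producer","consumer","source_app","target_app","region","neighborhood","environment"]

set_option maxRecDepth 100000 in
set_option maxHeartbeats 2000000 in
lemma contains_qm (nn : String) : PySem.Set.contains qmHints nn = (columnType.get? nn == some "queue_managers") := by
  by_cases hk : nn ∈ allKeys
  · fin_cases hk <;> decide
  · have h1 : columnType.get? nn = none := by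
      rw [hct, PySem.Dict.get?_eq_none_iff_not_mem_keys]
      simpa [allKeys, PySem.Dict.keys_mk] using hk
    have hq : nn ∉ (qmHints : List String) := fun hm => hk (by revert hm; simp [qmHints, allKeys]; tauto)
    have h2 : PySem.Set.contains qmHints nn = false := by
      simp [PySem.Set.contains, hq]
    rw [h1, h2]; rfl

set_option maxRecDepth 100000 in
set_option maxHeartbeats 2000000 in
lemma contains_queue (nn : String) : PySem.Set.contains queueHints nn = (columnType.get? nn == some "queues") := by
  by_cases hk : nn ∈ allKeys
  · fin_cases hk <;> decide
  · have h1 : columnType.get? nn = none := by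
      rw [hct, PySem.Dict.get?_eq_none_iff_not_mem_keys]
      simpa [allKeys, PySem.Dict.keys_mk] using hk
    have hq : nn ∉ (queueHints : List String) := fun hm => hk (by revert hm; simp [queueHints, allKeys]; tauto)
    have h2 : PySem.Set.contains queueHints nn = false := by
      simp [PySem.Set.contains, hq]
    rw [h1, h2]; rfl

set_option maxRecDepth 100000 in
set_option maxHeartbeats 2000000 in
lemma contains_app (nn : String) : PySem.Set.contains appHints nn = (columnType.get? nn == some "applications") := by
  by_cases hk : nn ∈ allKeys
  · fin_cases hk <;> decide
  · have h1 : columnType.get? nn = none := by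
      rw [hct, PySem.Dict.get?_eq_none_iff_not_mem_keys]
      simpa [allKeys, PySem.Dict.keys_mk] using hk
    have hq : nn ∉ (appHints : List String) := fun hm => hk (by revert hm; simp [appHints, allKeys]; tauto)
    have h2 : PySem.Set.contains appHints nn = false := by
      simp [PySem.Set.contains, hq]
    rw [h1, h2]; rfl

set_option maxRecDepth 100000 in
set_option maxHeartbeats 2000000 in
lemma contains_channel (nn : String) : PySem.Set.contains channelHints nn = (columnType.get? nn == some "channels") := by
  by_cases hk : nn ∈ allKeys
  · fin_cases hk <;> decide
  · have h1 : columnType.get? nn = none := by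
      rw [hct, PySem.Dict.get?_eq_none_iff_not_mem_keys]
      simpa [allKeys, PySem.Dict.keys_mk] using hk
    have hq : nn ∉ (channelHints : List String) := fun hm => hk (by revert hm; simp [channelHints, allKeys]; tauto)
    have h2 : PySem.Set.contains channelHints nn = false := by
      simp [PySem.Set.contains, hq]
    rw [h1, h2]; rfl

set_option maxRecDepth 100000 in
set_option maxHeartbeats 2000000 in
lemma contains_rel (nn : String) : PySem.Set.contains relHints nn = (columnType.get? nn == some "relationships") := by
  by_cases hk : nn ∈ allKeys
  · fin_cases hk <;> decide
  · have h1 : columnType.get? nn = none := by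
      rw [hct, PySem.Dict.get?_eq_none_iff_not_mem_keys]
      simpa [allKeys, PySem.Dict.keys_mk] using hk
    have hq : nn ∉ (relHints : List String) := fun hm => hk (by revert hm; simp [relHints, allKeys]; tauto)
    have h2 : PySem.Set.contains relHints nn = false := by
      simp [PySem.Set.contains, hq]
    rw [h1, h2]; rfl

set_option maxRecDepth 100000 in
set_option maxHeartbeats 2000000 in
lemma contains_meta (nn : String) : PySem.Set.contains metaHints nn = (columnType.get? nn == some "metadata") := by
  by_cases hk : nn ∈ allKeys
  · fin_cases hk <;> decide
  · have h1 : columnType.get? nn = none := by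
      rw [hct, PySem.Dict.get?_eq_none_iff_not_mem_keys]
      simpa [allKeys, PySem.Dict.keys_mk] using hk
    have hq : nn ∉ (metaHints : List String) := fun hm => hk (by revert hm; simp [metaHints, allKeys]; tauto)
    have h2 : PySem.Set.contains metaHints nn = false := by
      simp [PySem.Set.contains, hq]
    rw [h1, h2]; rfl

-- ===== VERDICT (by name: the statement is the Claim_ definition above) =====

def stepA (f : String → Int) (acc : Option String) (x : String) : Option String :=
  match acc with
  | none => some x
  | some m => if f m < f x then some x else some m

lemma selAux (l : List String) (f : String → Int) (m : String) (hm : 0 ≤ f m)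
    (hl : ∀ x ∈ l, 0 ≤ f x) :
    (match l.foldl (stepA f) (some m) with
      | some b => if (f b == 0) = true then "unknown" else b
      | none => "unknown")
    = (l.foldl (fun (b : String × Int) t => if f t > b.2 then (t, f t) else b)
        (if f m > 0 then (m, f m) else ("unknown", 0))).1 := by
  induction l generalizing m with
  | nil =>
    simp only [List.foldl_nil]
    by_cases h0 : f m > 0
    · rw [if_pos h0]
      have : (f m == 0) = false := by simp; omega
      simp [this]
    · rw [if_neg h0]
      have hz : f m = 0 := le_antisymm (by omega) hm
      simp [hz]
  | cons t l ih =>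
    simp only [List.foldl_cons, stepA]
    have hft : 0 ≤ f t := hl t (List.mem_cons_self)
    have hl' : ∀ x ∈ l, 0 ≤ f x := fun x hx => hl x (List.mem_cons_of_mem _ hx)
    by_cases h : f m < f t
    · simp only [if_pos h]
      rw [ih t hft hl']
      congr 1
      by_cases hm0 : f m > 0
      · rw [if_pos hm0, if_pos (by omega : f t > (m, f m).2), if_pos (by omega : f t > 0)]
      · have hz : f m = 0 := le_antisymm (by omega) hm
        rw [if_neg hm0, if_pos (by simp [hz] at h ⊢; omega : f t > (("unknown", 0) : String × Int).2)]
    · simp only [if_neg h]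
      rw [ih m hm hl']
      congr 1
      by_cases hm0 : f m > 0
      · rw [if_pos hm0, if_neg (by simp; omega : ¬ f t > (m, f m).2)]
      · have hz : f m = 0 := le_antisymm (by omega) hm
        rw [if_neg hm0, if_neg (by simp; omega : ¬ f t > (("unknown", 0) : String × Int).2)]

lemma foldl_step_some (f : String → Int) (xs : List String) (m : String) :
    ∃ b, xs.foldl (stepA f) (some m) = some b := by
  induction xs generalizing m with
  | nil => exact ⟨m, rfl⟩
  | cons t xs ih =>
    simp only [List.foldl_cons, stepA]
    by_cases h : f m < f t
    · rw [if_pos h]; exact ih t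
    · rw [if_neg h]; exact ih m

lemma sel (x : String) (xs : List String) (f : String → Int) (hx : 0 ≤ f x)
    (hl : ∀ y ∈ xs, 0 ≤ f y) :
    (if (f ((PySem.List.max? (x :: xs) f).getD "unknown") == 0) = true then "unknown"
     else (PySem.List.max? (x :: xs) f).getD "unknown")
    = ((x :: xs).foldl (fun (b : String × Int) t => if f t > b.2 then (t, f t) else b)
        ("unknown", 0)).1 := by
  have hmax : PySem.List.max? (x :: xs) f = xs.foldl (stepA f) (some x) := by
    have e : List.foldl (stepA f) none (x :: xs) = List.foldl (stepA f) (some x) xs := by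
      rw [List.foldl_cons]; rfl
    simp only [PySem.List.max?]
    rw [← e]
    congr 1
    funext acc y
    cases acc <;> rfl
  have h := selAux xs f x hx hl
  obtain ⟨b, hb⟩ := foldl_step_some f xs x
  rw [hmax, hb]
  rw [hb] at h
  simp only [Option.getD_some]
  simpa using h

set_option maxRecDepth 100000 in
set_option maxHeartbeats 4000000 in
theorem classify_dataset_spec : Claim_equal_classify_dataset := by
  intro filename columns _
  unfold Spec_classify_dataset classify_dataset classify_dataset_alt
  cases hf : fnameType? (stemOf filename) with
  | some t => rfl
  | none =>
    simp only
    set S := PySem.Set.ofList (columns.map normalizeHeader) with hS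
    rw [loop_split]
    have hfe : List.filter (fun y => !PySem.Set.empty.contains y) (PySem.Set.ofList (List.map normalizeHeader columns)) = S := List.filter_eq_self.mpr (fun a _ => rfl)
    rw [hfe]
    simp only []
    have hsc : (List.foldl (fun d p => d.insert p.1 (S.inter p.2).len) PySem.Dict.empty scorePairs)
        = PySem.Dict.mk [("queue_managers",(S.inter qmHints).len),("queues",(S.inter queueHints).len),("applications",(S.inter appHints).len),("channels",(S.inter channelHints).len),("relationships",(S.inter relHints).len),("metadata",(S.inter metaHints).len)] := rfl
    rw [hsc]
    have e1 : (S.inter qmHints).len = (S.countP (fun n => columnType.get? n == some "queue_managers") : Int) := by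
      simp only [PySem.Set.inter, PySem.Set.len, contains_qm]
      rw [List.countP_eq_length_filter]
    have e2 : (S.inter queueHints).len = (S.countP (fun n => columnType.get? n == some "queues") : Int) := by
      simp only [PySem.Set.inter, PySem.Set.len, contains_queue]
      rw [List.countP_eq_length_filter]
    have e3 : (S.inter appHints).len = (S.countP (fun n => columnType.get? n == some "applications") : Int) := by
      simp only [PySem.Set.inter, PySem.Set.len, contains_app]
      rw [List.countP_eq_length_filter]
    have e4 : (S.inter channelHints).len = (S.countP (fun n => columnType.get? n == some "channels") : Int) := by
      simp only [PySem.Set.inter, PySem.Set.len, contains_channel]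
      rw [List.countP_eq_length_filter]
    have e5 : (S.inter relHints).len = (S.countP (fun n => columnType.get? n == some "relationships") : Int) := by
      simp only [PySem.Set.inter, PySem.Set.len, contains_rel]
      rw [List.countP_eq_length_filter]
    have e6 : (S.inter metaHints).len = (S.countP (fun n => columnType.get? n == some "metadata") : Int) := by
      simp only [PySem.Set.inter, PySem.Set.len, contains_meta]
      rw [List.countP_eq_length_filter]
    rw [e1, e2, e3, e4, e5, e6]
    set C := List.foldl voteStep (List.foldl (fun d t => d.insert t 0) PySem.Dict.empty typeOrder) S with hC
    have hc0 : ∀ t : String, C.getD t 0 = (List.foldl (fun d t => d.insert t 0) PySem.Dict.empty typeOrder).getD t 0 + (S.countP (fun n => columnType.get? n == some t) : Int) := fun t => getD_foldl_voteStep S _ t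
    have z1 : ((List.foldl (fun d t => d.insert t 0) PySem.Dict.empty typeOrder).getD "queue_managers" (0:Int)) = 0 := by decide
    have c1 : C.getD "queue_managers" 0 = (S.countP (fun n => columnType.get? n == some "queue_managers") : Int) := by rw [hc0, z1, zero_add]
    have z2 : ((List.foldl (fun d t => d.insert t 0) PySem.Dict.empty typeOrder).getD "queues" (0:Int)) = 0 := by decide
    have c2 : C.getD "queues" 0 = (S.countP (fun n => columnType.get? n == some "queues") : Int) := by rw [hc0, z2, zero_add]
    have z3 : ((List.foldl (fun d t => d.insert t 0) PySem.Dict.empty typeOrder).getD "applications" (0:Int)) = 0 := by decide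
    have c3 : C.getD "applications" 0 = (S.countP (fun n => columnType.get? n == some "applications") : Int) := by rw [hc0, z3, zero_add]
    have z4 : ((List.foldl (fun d t => d.insert t 0) PySem.Dict.empty typeOrder).getD "channels" (0:Int)) = 0 := by decide
    have c4 : C.getD "channels" 0 = (S.countP (fun n => columnType.get? n == some "channels") : Int) := by rw [hc0, z4, zero_add]
    have z5 : ((List.foldl (fun d t => d.insert t 0) PySem.Dict.empty typeOrder).getD "relationships" (0:Int)) = 0 := by decide
    have c5 : C.getD "relationships" 0 = (S.countP (fun n => columnType.get? n == some "relationships") : Int) := by rw [hc0, z5, zero_add]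
    have z6 : ((List.foldl (fun d t => d.insert t 0) PySem.Dict.empty typeOrder).getD "metadata" (0:Int)) = 0 := by decide
    have c6 : C.getD "metadata" 0 = (S.countP (fun n => columnType.get? n == some "metadata") : Int) := by rw [hc0, z6, zero_add]
    simp only [typeOrder, List.foldl_cons, List.foldl_nil]
    rw [c1, c2, c3, c4, c5, c6]
    have hkeys : (PySem.Dict.mk [("queue_managers", ((S.countP (fun n => columnType.get? n == some "queue_managers") : Nat) : Int)), ("queues", ((S.countP (fun n => columnType.get? n == some "queues") : Nat) : Int)), ("applications", ((S.countP (fun n => columnType.get? n == some "applications") : Nat) : Int)), ("channels", ((S.countP (fun n => columnType.get? n == some "channels") : Nat) : Int)), ("relationships", ((S.countP (fun n => columnType.get? n == some "relationships") : Nat) : Int)), ("metadata", ((S.countP (fun n => columnType.get? n == some "metadata") : Nat) : Int))]).keys = "queue_managers" :: ["queues", "applications", "channels", "relationships", "metadata"] := rfl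
    rw [hkeys]
    have hx' : 0 ≤ (fun k => PySem.Dict.getD (PySem.Dict.mk [("queue_managers", ((S.countP (fun n => columnType.get? n == some "queue_managers") : Nat) : Int)), ("queues", ((S.countP (fun n => columnType.get? n == some "queues") : Nat) : Int)), ("applications", ((S.countP (fun n => columnType.get? n == some "applications") : Nat) : Int)), ("channels", ((S.countP (fun n => columnType.get? n == some "channels") : Nat) : Int)), ("relationships", ((S.countP (fun n => columnType.get? n == some "relationships") : Nat) : Int)), ("metadata", ((S.countP (fun n => columnType.get? n == some "metadata") : Nat) : Int))]) k 0) "queue_managers" := Int.natCast_nonneg _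
    have hl' : ∀ y ∈ ["queues", "applications", "channels", "relationships", "metadata"], 0 ≤ (fun k => PySem.Dict.getD (PySem.Dict.mk [("queue_managers", ((S.countP (fun n => columnType.get? n == some "queue_managers") : Nat) : Int)), ("queues", ((S.countP (fun n => columnType.get? n == some "queues") : Nat) : Int)), ("applications", ((S.countP (fun n => columnType.get? n == some "applications") : Nat) : Int)), ("channels", ((S.countP (fun n => columnType.get? n == some "channels") : Nat) : Int)), ("relationships", ((S.countP (fun n => columnType.get? n == some "relationships") : Nat) : Int)), ("metadata", ((S.countP (fun n => columnType.get? n == some "metadata") : Nat) : Int))]) k 0) y := by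
      intro y hy
      fin_cases hy <;> exact Int.natCast_nonneg _
    exact sel "queue_managers" ["queues", "applications", "channels", "relationships", "metadata"] (fun k => PySem.Dict.getD (PySem.Dict.mk [("queue_managers", ((S.countP (fun n => columnType.get? n == some "queue_managers") : Nat) : Int)), ("queues", ((S.countP (fun n => columnType.get? n == some "queues") : Nat) : Int)), ("applications", ((S.countP (fun n => columnType.get? n == some "applications") : Nat) : Int)), ("channels", ((S.countP (fun n => columnType.get? n == some "channels") : Nat) : Int)), ("relationships", ((S.countP (fun n => columnType.get? n == some "relationships") : Nat) : Int)), ("metadata", ((S.countP (fun n => columnType.get? n == some "metadata") : Nat) : Int))]) k 0) hx' hl'
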